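-- pv_equiv track=rewrite | github.com/Wzp65/RC-TLS | timeline_summarization.py | acquire_start_end_time
-- ===== SOURCE A (Python) =====
-- def acquire_start_end_time(golden_timelines):
--     g_start_time, g_end_time = [], []
--     start_time, end_time = golden_timelines[0][0][0], golden_timelines[0][-1][0]
--
--     for timeline in golden_timelines:
--         g_start_time.append(timeline[0][0])
--         g_end_time.append(timeline[-1][0])
--         if timeline[0][0] < start_time:
--             start_time = timeline[0][0]
--         if timeline[-1][0] > end_time:
--             end_time = timeline[-1][0]
--
--     return g_start_time, g_end_time, start_time, end_time
-- ===== SOURCE B (Python) =====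
-- def acquire_start_end_time(golden_timelines):
--     g_start_time = [t[0][0] for t in golden_timelines]
--     g_end_time = [t[-1][0] for t in golden_timelines]
--     return g_start_time, g_end_time, sorted(g_start_time)[0], sorted(g_end_time)[-1]
-- ===== Notes on version B (the rewrite author's own statement) =====
-- stated objective: alternative
-- what changed: Replaces A's single fused loop that tracks running min/max in four accumulators with building the start/end lists by comprehensions and then sorting each list, returning the first element of the sorted starts and the last element of the sorted ends.
import Mathlib
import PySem

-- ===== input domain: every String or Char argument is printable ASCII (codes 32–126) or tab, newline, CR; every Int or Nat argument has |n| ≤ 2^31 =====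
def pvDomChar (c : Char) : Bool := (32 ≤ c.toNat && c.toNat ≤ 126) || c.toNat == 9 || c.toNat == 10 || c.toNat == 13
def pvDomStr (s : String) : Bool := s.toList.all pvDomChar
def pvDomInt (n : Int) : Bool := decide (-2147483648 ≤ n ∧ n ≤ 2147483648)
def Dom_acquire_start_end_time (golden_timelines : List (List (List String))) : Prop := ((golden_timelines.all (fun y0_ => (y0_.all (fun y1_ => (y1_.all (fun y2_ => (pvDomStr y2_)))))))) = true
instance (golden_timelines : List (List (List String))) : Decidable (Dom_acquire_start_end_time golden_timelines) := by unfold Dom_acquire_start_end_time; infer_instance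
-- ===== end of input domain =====

-- B replaces A's fused min/max-tracking loop by build-the-lists, sort each, and take the sorted endpoints: a different (sort-based) algorithm, same results.

-- ===== PORT A =====
-- timeline[0][0] (IndexError → none, defaulted; excluded by Pre_)
def pvFirstTime (t : List (List String)) : String :=
  ((PySem.List.pyGet? t 0).bind (fun l => PySem.List.pyGet? l 0)).getD ""
-- timeline[-1][0]
def pvLastTime (t : List (List String)) : String :=
  ((PySem.List.pyGet? t (-1)).bind (fun l => PySem.List.pyGet? l 0)).getD ""

def acquire_start_end_time (golden_timelines : List (List (List String))) : List String × List String × String × String :=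
  -- start_time, end_time = golden_timelines[0][0][0], golden_timelines[0][-1][0]
  let start0 : String := ((PySem.List.pyGet? golden_timelines 0).map pvFirstTime).getD ""
  let end0 : String := ((PySem.List.pyGet? golden_timelines 0).map pvLastTime).getD ""
  golden_timelines.foldl
    (fun st timeline =>
      let a := pvFirstTime timeline
      let b := pvLastTime timeline
      (st.1 ++ [a], st.2.1 ++ [b],
       (if a < st.2.2.1 then a else st.2.2.1),
       (if b > st.2.2.2 then b else st.2.2.2)))
    (([] : List String), ([] : List String), start0, end0)

-- ===== PORT B =====
def acquire_start_end_time_alt (golden_timelines : List (List (List String))) : List String × List String × String × String :=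
  let g_start_time := golden_timelines.map pvFirstTime
  let g_end_time := golden_timelines.map pvLastTime
  (g_start_time, g_end_time,
   (PySem.List.pyGet? (PySem.List.sorted g_start_time (fun x => x) false) 0).getD "",
   (PySem.List.pyGet? (PySem.List.sorted g_end_time (fun x => x) false) (-1)).getD "")

-- ===== PRECONDITION & SPEC =====
-- Pre_ excludes exactly the inputs where Python A raises IndexError: an empty list,
-- a timeline that is empty, or a timeline whose first or last entry is an empty list.
def Pre_acquire_start_end_time (golden_timelines : List (List (List String))) : Prop :=
  golden_timelines ≠ [] ∧
  ∀ t ∈ golden_timelines, t ≠ [] ∧ t.headD [] ≠ [] ∧ t.getLastD [] ≠ []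
instance (golden_timelines : List (List (List String))) : Decidable (Pre_acquire_start_end_time golden_timelines) := by unfold Pre_acquire_start_end_time; infer_instance
def pvWitness_acquire_start_end_time : List (List (List String)) := [[["2001", "x"], ["2005", "y"]], [["1999"]]]

def Spec_acquire_start_end_time (golden_timelines : List (List (List String))) (out : List String × List String × String × String) : Prop := out = acquire_start_end_time_alt golden_timelines
instance (golden_timelines : List (List (List String))) (out : List String × List String × String × String) : Decidable (Spec_acquire_start_end_time golden_timelines out) := by unfold Spec_acquire_start_end_time; infer_instance

-- ===== CLAIM (what is proved, stated in full; the proofs are below) =====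
def Claim_equal_acquire_start_end_time : Prop := ∀ (golden_timelines : List (List (List String))), Dom_acquire_start_end_time golden_timelines → Pre_acquire_start_end_time golden_timelines → Spec_acquire_start_end_time golden_timelines (acquire_start_end_time golden_timelines)

-- ===== LEMMAS AND PROOFS =====

theorem pv_if_min (a st : String) : (if a < st then a else st) = min st a := by
  rcases lt_or_ge a st with h | h
  · simp only [if_pos h, min_def, if_neg (not_le_of_gt h)]
  · simp only [if_neg (not_lt_of_ge h), min_def, if_pos h]

theorem pv_if_max (b en : String) : (if b > en then b else en) = max en b := by
  rcases lt_or_ge en b with h | h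
  · simp only [if_pos h, max_def, if_pos (le_of_lt h)]
  · rcases eq_or_lt_of_le h with he | hl
    · simp [he]
    · simp only [if_neg (lt_asymm hl), max_def, if_neg (not_le_of_gt hl)]

-- characterisation of A's fused loop
theorem pv_foldA (l : List (List (List String))) (gs ge : List String) (st en : String) :
    l.foldl
      (fun st' timeline =>
        let a := pvFirstTime timeline
        let b := pvLastTime timeline
        (st'.1 ++ [a], st'.2.1 ++ [b],
         (if a < st'.2.2.1 then a else st'.2.2.1),
         (if b > st'.2.2.2 then b else st'.2.2.2)))
      (gs, ge, st, en)
    = (gs ++ l.map pvFirstTime, ge ++ l.map pvLastTime,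
       (l.map pvFirstTime).foldl min st, (l.map pvLastTime).foldl max en) := by
  induction l generalizing gs ge st en with
  | nil => simp
  | cons h t ih =>
    simp only [List.foldl_cons, List.map_cons]
    rw [pv_if_min, pv_if_max, ih]
    simp

theorem pv_foldl_min_mem (a : String) (r : List String) : r.foldl min a ∈ a :: r := by
  induction r generalizing a with
  | nil => simp
  | cons x t ih =>
    simp only [List.foldl_cons]
    rcases List.mem_cons.mp (ih (min a x)) with h | h
    · rcases min_cases a x with ⟨he, _⟩ | ⟨he, _⟩ <;> rw [h, he] <;> simp
    · simp [h]

theorem pv_foldl_min_le (a : String) (r : List String) : ∀ y ∈ a :: r, r.foldl min a ≤ y := by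
  induction r generalizing a with
  | nil => simp
  | cons x t ih =>
    intro y hy
    simp only [List.foldl_cons]
    rcases List.mem_cons.mp hy with rfl | hy'
    · exact le_trans (ih (min y x) (min y x) List.mem_cons_self) (min_le_left y x)
    · rcases List.mem_cons.mp hy' with rfl | hy''
      · exact le_trans (ih (min a y) (min a y) List.mem_cons_self) (min_le_right a y)
      · exact ih (min a x) y (List.mem_cons_of_mem _ hy'')

theorem pv_foldl_max_mem (a : String) (r : List String) : r.foldl max a ∈ a :: r := by
  induction r generalizing a with
  | nil => simp
  | cons x t ih =>
    simp only [List.foldl_cons]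
    rcases List.mem_cons.mp (ih (max a x)) with h | h
    · rcases max_cases a x with ⟨he, _⟩ | ⟨he, _⟩ <;> rw [h, he] <;> simp
    · simp [h]

theorem pv_foldl_le_max (a : String) (r : List String) : ∀ y ∈ a :: r, y ≤ r.foldl max a := by
  induction r generalizing a with
  | nil => simp
  | cons x t ih =>
    intro y hy
    simp only [List.foldl_cons]
    rcases List.mem_cons.mp hy with rfl | hy'
    · exact le_trans (le_max_left y x) (ih (max y x) (max y x) List.mem_cons_self)
    · rcases List.mem_cons.mp hy' with rfl | hy''
      · exact le_trans (le_max_right a y) (ih (max a y) (max a y) List.mem_cons_self)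
      · exact ih (max a x) y (List.mem_cons_of_mem _ hy'')

theorem pv_pairwise_le_getLast (l : List String) (h : l.Pairwise (· ≤ ·)) (hne : l ≠ []) :
    ∀ y ∈ l, y ≤ l.getLast hne := by
  induction l with
  | nil => simp at hne
  | cons x t ih =>
    intro y hy
    cases t with
    | nil => simp_all
    | cons z s =>
      have hlast : (x :: z :: s).getLast hne = (z :: s).getLast (by simp) :=
        List.getLast_cons (by simp)
      rcases List.mem_cons.mp hy with rfl | hy'
      · have hx : y ≤ z := (List.pairwise_cons.mp h).1 z List.mem_cons_self
        have := ih (List.pairwise_cons.mp h).2 (by simp) z List.mem_cons_self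
        rw [hlast]; exact le_trans hx this
      · rw [hlast]; exact ih (List.pairwise_cons.mp h).2 (by simp) y hy'

theorem pv_sorted_first (a : String) (r : List String) :
    (PySem.List.pyGet? (PySem.List.sorted (a :: r) (fun x => x) false) 0).getD ""
      = r.foldl min a := by
  rcases hs : PySem.List.sorted (a :: r) (fun x => x) false with _ | ⟨m, t⟩
  · exact absurd ((PySem.List.sorted_eq_nil_iff (a :: r) (fun x => x) false).mp hs) (by simp)
  · have hmle : ∀ y ∈ a :: r, m ≤ y := PySem.List.key_head_sorted_le (a :: r) (fun x => x) hs
    have hmem : m ∈ a :: r := by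
      have h := (PySem.List.sorted_perm (a :: r) (fun x => x) false).mem_iff (a := m)
      rw [hs] at h
      exact h.mp List.mem_cons_self
    have h1 : r.foldl min a ≤ m := pv_foldl_min_le a r m hmem
    have h2 : m ≤ r.foldl min a := hmle _ (pv_foldl_min_mem a r)
    rw [← le_antisymm h2 h1]
    simp [PySem.List.pyGet?, PySem.List.pyIdx?]

theorem pv_sorted_last (a : String) (r : List String) :
    (PySem.List.pyGet? (PySem.List.sorted (a :: r) (fun x => x) false) (-1)).getD ""
      = r.foldl max a := by
  rcases hs : PySem.List.sorted (a :: r) (fun x => x) false with _ | ⟨m, t⟩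
  · exact absurd ((PySem.List.sorted_eq_nil_iff (a :: r) (fun x => x) false).mp hs) (by simp)
  · have hpw : (m :: t).Pairwise (· ≤ ·) := by
      have := PySem.List.sorted_pairwise (a :: r) (fun x => x); rw [hs] at this; exact this
    have hperm : (m :: t).Perm (a :: r) := by
      have := PySem.List.sorted_perm (a :: r) (fun x => x) false; rw [hs] at this; exact this
    have hne : (m :: t) ≠ [] := by simp
    have hlast_mem : (m :: t).getLast hne ∈ a :: r := hperm.mem_iff.mp (List.getLast_mem hne)
    have hfold_mem : r.foldl max a ∈ m :: t := hperm.mem_iff.mpr (pv_foldl_max_mem a r)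
    have hval : (m :: t).getLast hne = r.foldl max a :=
      le_antisymm (pv_foldl_le_max a r _ hlast_mem) (pv_pairwise_le_getLast _ hpw hne _ hfold_mem)
    have hlt : (m :: t).getLast hne = (m :: t)[t.length] := by
      rw [List.getLast_eq_getElem]; congr 1
    rw [show PySem.List.pyGet? (m :: t) (-1) = some ((m :: t)[t.length]) from by
      simp [PySem.List.pyGet?, PySem.List.pyIdx?]]
    rw [← hlt, hval]
    rfl

-- ===== VERDICT (by name: the statement is the Claim_ definition above) =====
theorem acquire_start_end_time_spec : Claim_equal_acquire_start_end_time := by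
  intro gts _ hpre
  unfold Spec_acquire_start_end_time acquire_start_end_time acquire_start_end_time_alt
  cases gts with
  | nil => exact absurd rfl hpre.1
  | cons h t =>
    simp only [PySem.List.pyGet?_zero_cons, Option.map_some, Option.getD_some,
      List.foldl_cons, List.map_cons, pv_foldA]
    rw [pv_sorted_first, pv_sorted_last]
    simp
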